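-- pv_equiv track=rewrite | github.com/Mustapha-aneen/Codeworld | myapp/views.py | slug_concat
-- ===== SOURCE A (Python) =====
-- def slug_concat(title):
--   s = title
--   c = ""
--   l = len(s.split(" "))
--   for i in range(l):
--     c += (s.split(" ")[i]+"-")
--   rem = ""
--   for i,v in enumerate(c):
--     if i != len(c)-1:
--       rem += v
--     else:
--       break
--   return rem
-- ===== SOURCE B (Python) =====
-- def slug_concat(title):
--   out = ""
--   for ch in title:
--     out += "-" if ch == " " else ch
--   return out
-- ===== Notes on version B (the rewrite author's own statement) =====
-- stated objective: faster
-- what changed: B replaces A's pipeline (split on spaces, re-split once per loop iteration, join words with a hyphen separator, then an enumerate loop to strip the trailing separator) with a single character-level pass substituting a hyphen for each space.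
import Mathlib
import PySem

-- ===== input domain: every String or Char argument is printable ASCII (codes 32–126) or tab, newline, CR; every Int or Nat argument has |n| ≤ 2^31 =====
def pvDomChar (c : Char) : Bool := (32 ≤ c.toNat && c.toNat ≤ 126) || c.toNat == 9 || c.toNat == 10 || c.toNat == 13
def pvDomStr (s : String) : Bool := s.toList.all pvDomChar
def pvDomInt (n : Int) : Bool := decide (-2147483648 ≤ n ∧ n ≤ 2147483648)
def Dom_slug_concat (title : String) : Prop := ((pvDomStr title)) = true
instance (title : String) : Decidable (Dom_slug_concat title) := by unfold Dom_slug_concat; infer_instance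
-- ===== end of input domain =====

-- B does a single character pass replacing each ' ' by '-' instead of A's split/join/trim pipeline (simpler decomposition, same return value).

-- ===== PORT A =====
-- second loop of A: for i,v in enumerate(c): if i != len(c)-1: rem += v else: break
def slugRemLoop (total : Nat) (i : Nat) (cs : List Char) (acc : List Char) : List Char :=
  match cs with
  | [] => acc
  | v :: rest =>
    if i ≠ total - 1 then slugRemLoop total (i + 1) rest (acc ++ [v])
    else acc

def slugCLoop (s : List Char) : List Char :=
  (PySem.List.pyRange 0 (((PySem.Chars.splitOn s [' ']).length : Int)) 1).foldl
    (fun c i => c ++ (PySem.List.pyGetD (PySem.Chars.splitOn s [' ']) i [] ++ ['-'])) []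

def slugConcatChars (s : List Char) : List Char :=
  slugRemLoop (slugCLoop s).length 0 (slugCLoop s) []

def slug_concat (title : String) : String :=
  String.ofList (slugConcatChars title.toList)

-- ===== PORT B =====
def slug_concat_alt (title : String) : String :=
  String.ofList (title.toList.foldl (fun acc ch => acc ++ [if ch = ' ' then '-' else ch]) [])

-- ===== PRECONDITION & SPEC =====
def Spec_slug_concat (title : String) (out : String) : Prop := out = slug_concat_alt title
instance (title : String) (out : String) : Decidable (Spec_slug_concat title out) := by unfold Spec_slug_concat; infer_instance

-- ===== CLAIM (what is proved, stated in full; the proofs are below) =====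
def Claim_equal_slug_concat : Prop := ∀ (title : String), Dom_slug_concat title → Spec_slug_concat title (slug_concat title)

-- ===== LEMMAS AND PROOFS =====

-- reference form of Python's s.split(" ") on a char list
def slugSplit (pre : List Char) : List Char → List (List Char)
  | [] => [pre]
  | ch :: rest => if ch = ' ' then pre :: slugSplit [] rest else slugSplit (pre ++ [ch]) rest

lemma slugSplit_go (fuel : Nat) : ∀ (l cur : List Char) (acc : List (List Char)), l.length < fuel →
    PySem.Chars.splitOn.go [' '] fuel l cur acc = acc.reverse ++ slugSplit cur.reverse l := by
  induction fuel with
  | zero => intro l cur acc h; omega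
  | succ fuel ih =>
    intro l cur acc h
    cases l with
    | nil => simp [PySem.Chars.splitOn.go, slugSplit]
    | cons ch rest =>
      by_cases hc : ch = ' '
      · subst hc
        simp only [PySem.Chars.splitOn.go, List.isPrefixOf, slugSplit]
        simp only [List.length_cons] at h
        rw [if_pos (by decide), show List.drop [' '].length (' ' :: rest) = rest from rfl,
          ih rest [] (cur.reverse :: acc) (by omega)]
        simp
      · simp only [PySem.Chars.splitOn.go, slugSplit]
        simp only [List.length_cons] at h
        rw [if_neg (by simp only [List.isPrefixOf, Bool.and_eq_true, beq_iff_eq]; exact fun h => hc h.1.symm), ih rest (ch :: cur) acc (by omega)]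
        simp [hc]

lemma splitOn_space (s : List Char) :
    PySem.Chars.splitOn s [' '] = slugSplit [] s := by
  have := slugSplit_go (s.length + 1) s [] [] (by omega)
  simpa [PySem.Chars.splitOn] using this

lemma slugRemLoop_dropLast : ∀ (cs : List Char) (i : Nat) (acc : List Char),
    slugRemLoop (i + cs.length) i cs acc = acc ++ cs.dropLast := by
  intro cs
  induction cs with
  | nil => intro i acc; simp [slugRemLoop]
  | cons v rest ih =>
    intro i acc
    cases rest with
    | nil => simp only [slugRemLoop, List.length_cons]; rw [if_neg (by simp)]; simp
    | cons w rest' =>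
      rw [slugRemLoop]
      rw [if_pos (by simp only [List.length_cons]; omega)]
      have hih := ih (i + 1) (acc ++ [v])
      simp only [List.length_cons] at hih ⊢
      rw [show i + (rest'.length + 1 + 1) = i + 1 + (rest'.length + 1) from by omega, hih]
      simp

lemma slugSplit_flatten (s : List Char) : ∀ (pre : List Char),
    ((slugSplit pre s).map (· ++ ['-'])).flatten
      = pre ++ (s.map (fun ch => if ch = ' ' then '-' else ch)) ++ ['-'] := by
  induction s with
  | nil => intro pre; simp [slugSplit]
  | cons ch rest ih =>
    intro pre
    by_cases hc : ch = ' '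
    · subst hc
      simp [slugSplit, ih []]
    · simp [slugSplit, hc, ih (pre ++ [ch])]

lemma slugConcatChars_eq (s : List Char) :
    slugConcatChars s = s.map (fun ch => if ch = ' ' then '-' else ch) := by
  unfold slugConcatChars slugCLoop
  have hfold :
      (PySem.List.pyRange 0 ((PySem.Chars.splitOn s [' ']).length : Int) 1).foldl
        (fun c i => c ++ (PySem.List.pyGetD (PySem.Chars.splitOn s [' ']) i [] ++ ['-'])) []
      = ((PySem.Chars.splitOn s [' ']).map (· ++ ['-'])).flatten := by
    rw [show (fun (c : List Char) (i : Int) =>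
          c ++ (PySem.List.pyGetD (PySem.Chars.splitOn s [' ']) i [] ++ ['-']))
        = (fun c i => c ++ (fun j => PySem.List.pyGetD (PySem.Chars.splitOn s [' ']) j [] ++ ['-']) i)
        from rfl]
    rw [PySem.List.foldl_append_eq_flatMap]
    rw [List.flatMap_def]
    have : (PySem.List.pyRange 0 ((PySem.Chars.splitOn s [' ']).length : Int) 1).map
        (fun j => PySem.List.pyGetD (PySem.Chars.splitOn s [' ']) j [] ++ ['-'])
        = ((PySem.List.pyRange 0 ((PySem.Chars.splitOn s [' ']).length : Int) 1).map
            (fun j => PySem.List.pyGetD (PySem.Chars.splitOn s [' ']) j [])).map (· ++ ['-']) := by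
      simp [List.map_map]
    rw [this]
    have hlen : ((PySem.Chars.splitOn s [' ']).length : Int)
        = PySem.List.len (PySem.Chars.splitOn s [' ']) := by
      simp [PySem.List.len_eq]
    rw [hlen, PySem.List.map_pyGetD_pyRange_zero]
    simp
  rw [hfold]
  rw [show ((PySem.Chars.splitOn s [' ']).map (· ++ ['-'])).flatten.length
        = 0 + ((PySem.Chars.splitOn s [' ']).map (· ++ ['-'])).flatten.length from (Nat.zero_add _).symm,
      slugRemLoop_dropLast]
  rw [splitOn_space, slugSplit_flatten s []]
  simp

-- ===== VERDICT (by name: the statement is the Claim_ definition above) =====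
theorem slug_concat_spec : Claim_equal_slug_concat := by
  intro title _
  unfold Spec_slug_concat slug_concat slug_concat_alt
  rw [slugConcatChars_eq, PySem.List.foldl_append_singleton_eq_map]
  simp
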